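-- pv_equiv track=rewrite | github.com/ivanwakeup/algorithms | algorithms/prep/microsoft/crop_words.py | crop_words
-- ===== SOURCE A (Python) =====
-- def crop_words(message, k):
--     result = []
--     buf = []
--     for i, char in enumerate(message):
--         if char == " " and buf:
--             result.append("".join(buf))
--             buf = []
--         if i >= k:
--             return " ".join(result) if result else ""
--         elif char != " ":
--             buf.append(char)
--
--     if buf:
--         result.append("".join(buf))
--
--     return " ".join(result) if result else ""
-- ===== SOURCE B (Python) =====
-- def crop_words(message, k):
--     if k < 0:
--         return ""
--     if k >= len(message):
--         tokens = message.split(" ")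
--     elif message[k] == " ":
--         tokens = message[:k].split(" ")
--     else:
--         tokens = message[:k].split(" ")[:-1]
--     return " ".join(t for t in tokens if t)
-- ===== Notes on version B (the rewrite author's own statement) =====
-- stated objective: simpler
-- what changed: Replaces the char-by-char accumulator loop with early return by one slice at k plus a single split-on-space and a filtered join (dropping the partial last token unless message[k] is a space).
import Mathlib
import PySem

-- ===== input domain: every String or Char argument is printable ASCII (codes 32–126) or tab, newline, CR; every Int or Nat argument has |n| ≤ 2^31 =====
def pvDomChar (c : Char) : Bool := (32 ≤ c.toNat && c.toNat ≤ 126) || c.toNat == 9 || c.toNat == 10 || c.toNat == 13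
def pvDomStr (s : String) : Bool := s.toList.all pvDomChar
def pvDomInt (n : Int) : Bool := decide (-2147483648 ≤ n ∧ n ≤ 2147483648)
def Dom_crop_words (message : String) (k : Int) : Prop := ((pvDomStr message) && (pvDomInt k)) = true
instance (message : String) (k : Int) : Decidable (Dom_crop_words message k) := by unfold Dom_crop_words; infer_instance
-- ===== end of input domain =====

-- B replaces A's char-by-char accumulator loop (with early return) by one slice at k
-- plus a single split-on-space and a filtered join; simpler decomposition, same asymptotic cost.

-- ===== PORT A =====
-- the for-loop over enumerate(message) with state (result, buf); early return when i >= k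
def crop_words_loop (k : Int) : List Char → Int → List String → List Char → String
  | [], _, result, buf =>
      let result := if buf ≠ [] then result ++ [String.ofList buf] else result
      if result ≠ [] then PySem.Str.join " " result else ""
  | c :: rest, i, result, buf =>
      let st := if c = ' ' ∧ buf ≠ [] then (result ++ [String.ofList buf], ([] : List Char))
                else (result, buf)
      if i ≥ k then (if st.1 ≠ [] then PySem.Str.join " " st.1 else "")
      else if c ≠ ' ' then crop_words_loop k rest (i + 1) st.1 (st.2 ++ [c])
      else crop_words_loop k rest (i + 1) st.1 st.2

def crop_words (message : String) (k : Int) : String :=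
  crop_words_loop k message.toList 0 [] []

-- ===== PORT B =====
def crop_words_alt (message : String) (k : Int) : String :=
  if k < 0 then ""
  else
    let tokens : List (List Char) :=
      if PySem.Str.len message ≤ k then
        PySem.Chars.splitOn message.toList [' ']
      else if PySem.Str.pyGet? message k = some ' ' then
        PySem.Chars.splitOn (PySem.Str.slice message none (some k)).toList [' ']
      else
        PySem.List.slice (PySem.Chars.splitOn (PySem.Str.slice message none (some k)).toList [' ']) none (some (-1))
    String.ofList (PySem.Chars.join [' '] (tokens.filter (· ≠ [])))

-- ===== PRECONDITION & SPEC =====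
def Spec_crop_words (message : String) (k : Int) (out : String) : Prop := out = crop_words_alt message k
instance (message : String) (k : Int) (out : String) : Decidable (Spec_crop_words message k out) := by unfold Spec_crop_words; infer_instance

-- ===== CLAIM (what is proved, stated in full; the proofs are below) =====
def Claim_equal_crop_words : Prop := ∀ (message : String) (k : Int), Dom_crop_words message k → Spec_crop_words message k (crop_words message k)

-- ===== LEMMAS AND PROOFS =====

-- Python-style split on a single space, simple structural form
def splitSp : List Char → List (List Char)
  | [] => [[]]
  | c :: cs =>
    if c = ' ' then [] :: splitSp cs
    else match splitSp cs with
      | [] => [[c]]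
      | t :: ts => (c :: t) :: ts

-- token list of cs when the current (unfinished) word already holds b
def tokensFrom (b : List Char) (cs : List Char) : List (List Char) :=
  match splitSp cs with
  | [] => [b]
  | t :: ts => (b ++ t) :: ts

def joinA (r : List String) : String := if r ≠ [] then PySem.Str.join " " r else ""

def fin2 (r : List String) (ts : List (List Char)) : String :=
  joinA (r ++ (ts.filter (· ≠ [])).map String.ofList)

-- closed form of A's loop as a function of the remaining chars, countdown m = k - i, and state
def rhs (cs : List Char) (m : Int) (r : List String) (b : List Char) : String :=
  if m ≤ 0 then
    match cs with
    | [] => fin2 r [b]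
    | c :: _ => joinA (if c = ' ' ∧ b ≠ [] then r ++ [String.ofList b] else r)
  else if (cs.length : Int) ≤ m then fin2 r (tokensFrom b cs)
  else if cs.getD m.toNat ' ' = ' ' then fin2 r (tokensFrom b (List.take m.toNat cs))
  else fin2 r ((tokensFrom b (List.take m.toNat cs)).dropLast)

theorem splitSp_ne_nil (cs : List Char) : splitSp cs ≠ [] := by
  cases cs with
  | nil => simp [splitSp]
  | cons c cs =>
    simp only [splitSp]
    split
    · simp
    · split <;> simp

theorem tokensFrom_nil (b : List Char) : tokensFrom b [] = [b] := by
  simp [tokensFrom, splitSp]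

theorem tokensFrom_nil_left (cs : List Char) : tokensFrom [] cs = splitSp cs := by
  unfold tokensFrom
  cases h : splitSp cs with
  | nil => exact absurd h (splitSp_ne_nil cs)
  | cons t ts => simp

theorem tokensFrom_space (b cs) : tokensFrom b (' ' :: cs) = b :: splitSp cs := by
  unfold tokensFrom
  simp only [splitSp]
  simp

theorem tokensFrom_cons {c : Char} (hc : c ≠ ' ') (b cs) :
    tokensFrom b (c :: cs) = tokensFrom (b ++ [c]) cs := by
  unfold tokensFrom
  simp only [splitSp, if_neg hc]
  cases h : splitSp cs with
  | nil => exact absurd h (splitSp_ne_nil cs)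
  | cons t ts => simp

theorem fin2_cons (r : List String) (b : List Char) (ts : List (List Char)) :
    fin2 r (b :: ts) = fin2 (if b ≠ [] then r ++ [String.ofList b] else r) ts := by
  by_cases hb : b = []
  · simp [fin2, hb]
  · simp [fin2, hb, List.append_assoc]

theorem fin2_nil_join (r : List String) : fin2 r [[]] = joinA r := by
  simp [fin2]

theorem fin2_singleton (r : List String) (b : List Char) :
    fin2 r [b] = joinA (if b ≠ [] then r ++ [String.ofList b] else r) := by
  by_cases hb : b = [] <;> simp [fin2, hb]

theorem fin2_nil (r : List String) : fin2 r [] = joinA r := by simp [fin2]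

theorem rhs_step_space (rest : List Char) (m : Int) (hm : 0 < m) (r : List String) (b : List Char) :
    rhs (' ' :: rest) m r b = rhs rest (m - 1) (if b ≠ [] then r ++ [String.ofList b] else r) [] := by
  have hnm : ¬ m ≤ 0 := by omega
  by_cases h1 : m - 1 ≤ 0
  · have hm1 : m = 1 := by omega
    subst hm1
    cases rest with
    | nil =>
      simp only [rhs, if_neg hnm, if_pos h1]
      rw [if_pos (by simp), tokensFrom_space, fin2_cons, splitSp, fin2_nil_join]
    | cons c' rest' =>
      have hlen : ¬ (((' ' :: c' :: rest').length : Int) ≤ 1) := by simp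
      simp only [rhs, if_neg hnm, if_pos h1, if_neg hlen]
      have htk : List.take (1 : Int).toNat (' ' :: c' :: rest') = [' '] := rfl
      have hg : List.getD (' ' :: c' :: rest') (1 : Int).toNat ' ' = c' := rfl
      rw [htk, hg, tokensFrom_space]
      by_cases hc' : c' = ' '
      · rw [if_pos hc', fin2_cons, splitSp, fin2_nil_join]
        simp [hc', joinA]
      · rw [if_neg hc']
        by_cases hb : b = [] <;> simp [fin2, joinA, hb, hc', splitSp]
  · by_cases hlen : ((rest.length : Int) ≤ m - 1)
    · have hlen' : (((' ' :: rest).length : Int) ≤ m) := by simp only [List.length_cons] at hlen ⊢; push_cast at hlen ⊢; omega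
      simp only [rhs, if_neg hnm, if_neg h1, if_pos hlen, if_pos hlen']
      rw [tokensFrom_space, fin2_cons, tokensFrom_nil_left]
    · have hlen' : ¬ (((' ' :: rest).length : Int) ≤ m) := by simp only [List.length_cons] at hlen ⊢; push_cast at hlen ⊢; omega
      have htn : m.toNat = (m - 1).toNat + 1 := by omega
      have hget : List.getD (' ' :: rest) m.toNat ' ' = List.getD rest (m - 1).toNat ' ' := by
        rw [htn, List.getD_cons_succ]
      have htake : List.take m.toNat (' ' :: rest) = ' ' :: List.take (m - 1).toNat rest := by
        rw [htn, List.take_succ_cons]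
      simp only [rhs, if_neg hnm, if_neg h1, if_neg hlen, if_neg hlen', hget, htake]
      by_cases hsp : List.getD rest (m - 1).toNat ' ' = ' '
      · rw [if_pos hsp, if_pos hsp, tokensFrom_space, fin2_cons, tokensFrom_nil_left]
      · rw [if_neg hsp, if_neg hsp, tokensFrom_space, tokensFrom_nil_left,
            List.dropLast_cons_of_ne_nil (splitSp_ne_nil _), fin2_cons]

theorem rhs_step_char {c : Char} (hc : c ≠ ' ') (rest : List Char) (m : Int) (hm : 0 < m)
    (r : List String) (b : List Char) :
    rhs (c :: rest) m r b = rhs rest (m - 1) r (b ++ [c]) := by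
  have hnm : ¬ m ≤ 0 := by omega
  by_cases h1 : m - 1 ≤ 0
  · have hm1 : m = 1 := by omega
    subst hm1
    cases rest with
    | nil =>
      simp only [rhs, if_neg hnm, if_pos h1]
      rw [if_pos (by simp), tokensFrom_cons hc, tokensFrom_nil, fin2_singleton]
    | cons c' rest' =>
      have hlen : ¬ (((c :: c' :: rest').length : Int) ≤ 1) := by simp
      simp only [rhs, if_neg hnm, if_pos h1, if_neg hlen]
      have htk : List.take (1 : Int).toNat (c :: c' :: rest') = [c] := rfl
      have hg : List.getD (c :: c' :: rest') (1 : Int).toNat ' ' = c' := rfl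
      rw [htk, hg, tokensFrom_cons hc, tokensFrom_nil]
      by_cases hc' : c' = ' '
      · rw [if_pos hc', fin2_singleton]
        simp [hc']
      · rw [if_neg hc', show ([b ++ [c]] : List (List Char)).dropLast = [] from rfl, fin2_nil]
        simp [hc']
  · by_cases hlen : ((rest.length : Int) ≤ m - 1)
    · have hlen' : (((c :: rest).length : Int) ≤ m) := by simp only [List.length_cons] at hlen ⊢; push_cast at hlen ⊢; omega
      simp only [rhs, if_neg hnm, if_neg h1, if_pos hlen, if_pos hlen']
      rw [tokensFrom_cons hc]
    · have hlen' : ¬ (((c :: rest).length : Int) ≤ m) := by simp only [List.length_cons] at hlen ⊢; push_cast at hlen ⊢; omega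
      have htn : m.toNat = (m - 1).toNat + 1 := by omega
      have hget : List.getD (c :: rest) m.toNat ' ' = List.getD rest (m - 1).toNat ' ' := by
        rw [htn, List.getD_cons_succ]
      have htake : List.take m.toNat (c :: rest) = c :: List.take (m - 1).toNat rest := by
        rw [htn, List.take_succ_cons]
      simp only [rhs, if_neg hnm, if_neg h1, if_neg hlen, if_neg hlen', hget, htake]
      by_cases hsp : List.getD rest (m - 1).toNat ' ' = ' '
      · rw [if_pos hsp, if_pos hsp, tokensFrom_cons hc]
      · rw [if_neg hsp, if_neg hsp, tokensFrom_cons hc]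

theorem loop_eq (k : Int) (cs : List Char) : ∀ (i : Int) (r : List String) (b : List Char),
    crop_words_loop k cs i r b = rhs cs (k - i) r b := by
  induction cs with
  | nil =>
    intro i r b
    have h1 : crop_words_loop k [] i r b = joinA (if b ≠ [] then r ++ [String.ofList b] else r) := by
      simp [crop_words_loop, joinA]
    rw [h1, ← fin2_singleton]
    by_cases hm : k - i ≤ 0
    · simp [rhs, hm]
    · rw [rhs, if_neg hm, if_pos (by simp; omega), tokensFrom_nil]
  | cons c rest ih =>
    intro i r b
    by_cases hk : i ≥ k
    · have hm : k - i ≤ 0 := by omega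
      by_cases hcb : c = ' ' ∧ b ≠ [] <;>
        simp [crop_words_loop, rhs, hk, hm, hcb, joinA]
    · have hm0 : 0 < k - i := by omega
      have hi : k - (i + 1) = k - i - 1 := by ring
      by_cases hc : c = ' '
      · subst hc
        by_cases hb : b = []
        · subst hb
          have hL : crop_words_loop k (' ' :: rest) i r [] = crop_words_loop k rest (i + 1) r [] := by
            simp [crop_words_loop, if_neg hk]
          rw [hL, ih, hi, rhs_step_space rest (k - i) hm0 r []]
          simp
        · have hL : crop_words_loop k (' ' :: rest) i r b
              = crop_words_loop k rest (i + 1) (r ++ [String.ofList b]) [] := by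
            simp [crop_words_loop, if_neg hk, hb]
          rw [hL, ih, hi, rhs_step_space rest (k - i) hm0 r b]
          simp [hb]
      · have hL : crop_words_loop k (c :: rest) i r b
            = crop_words_loop k rest (i + 1) r (b ++ [c]) := by
          simp [crop_words_loop, if_neg hk, hc]
        rw [hL, ih, hi, rhs_step_char hc rest (k - i) hm0 r b]

theorem go_space (fuel : Nat) : ∀ (l : List Char), l.length ≤ fuel → ∀ (cur : List Char) (acc : List (List Char)),
    PySem.Chars.splitOn.go [' '] fuel l cur acc = acc.reverse ++ tokensFrom cur.reverse l := by
  induction fuel with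
  | zero =>
    intro l hl cur acc
    have hln : l = [] := by cases l <;> simp_all
    subst hln
    simp [PySem.Chars.splitOn.go, tokensFrom_nil]
  | succ f ih =>
    intro l hl cur acc
    cases l with
    | nil => simp [PySem.Chars.splitOn.go, tokensFrom_nil]
    | cons c rest =>
      have hr : rest.length ≤ f := by simp at hl; omega
      by_cases hc : c = ' '
      · subst hc
        rw [show PySem.Chars.splitOn.go [' '] (f + 1) (' ' :: rest) cur acc
              = PySem.Chars.splitOn.go [' '] f rest [] (cur.reverse :: acc) from by
            simp [PySem.Chars.splitOn.go, List.isPrefixOf]]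
        rw [ih rest hr [] (cur.reverse :: acc)]
        simp [tokensFrom_space, tokensFrom_nil_left]
      · rw [show PySem.Chars.splitOn.go [' '] (f + 1) (c :: rest) cur acc
              = PySem.Chars.splitOn.go [' '] f rest (c :: cur) acc from by
            simp [PySem.Chars.splitOn.go, List.isPrefixOf, Ne.symm hc]]
        rw [ih rest hr (c :: cur) acc]
        simp [tokensFrom_cons hc]

theorem splitOn_space (cs : List Char) : PySem.Chars.splitOn cs [' '] = splitSp cs := by
  rw [PySem.Chars.splitOn, go_space (cs.length + 1) cs (by omega) [] []]
  simp [tokensFrom_nil_left]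

theorem join_bridge (l : List (List Char)) :
    joinA (l.map String.ofList) = String.ofList (PySem.Chars.join [' '] l) := by
  cases l with
  | nil => simp [joinA, PySem.Chars.join]; rfl
  | cons x l =>
    rw [joinA, if_pos (by simp)]
    apply String.toList_inj.mp
    rw [PySem.Str.toList_join]
    have hsp : " ".toList = [' '] := rfl
    simp [hsp, PySem.Chars.join, Function.comp_def]

theorem rhs_nonpos (cs : List Char) (m : Int) (hm : m ≤ 0) : rhs cs m [] [] = "" := by
  cases cs <;> simp [rhs, hm, fin2, joinA]

theorem fin2_nil_left (ts : List (List Char)) :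
    fin2 [] ts = String.ofList (PySem.Chars.join [' '] (ts.filter (· ≠ []))) := by
  rw [fin2]
  simp only [List.nil_append]
  exact join_bridge _

theorem rhs_alt (cs : List Char) (k : Int) (hk : 0 ≤ k) : rhs cs k [] [] =
    fin2 [] (if (cs.length : Int) ≤ k then splitSp cs
             else if cs.getD k.toNat ' ' = ' ' then splitSp (List.take k.toNat cs)
             else (splitSp (List.take k.toNat cs)).dropLast) := by
  by_cases hk0 : k ≤ 0
  · have hz : k = 0 := by omega
    subst hz
    cases cs with
    | nil => simp [rhs, splitSp]
    | cons c rest =>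
      have hlen : ¬ (((c :: rest).length : Int) ≤ 0) := by simp
      have hL : rhs (c :: rest) 0 [] [] = "" := by simp [rhs, joinA]
      rw [hL, if_neg hlen, show List.take (0 : Int).toNat (c :: rest) = [] from rfl,
        show (c :: rest).getD ((0 : Int).toNat) ' ' = c from rfl]
      by_cases hc : c = ' ' <;> simp [hc, fin2, joinA, splitSp]
  · unfold rhs
    rw [if_neg (by omega : ¬ k ≤ 0)]
    split_ifs <;> simp [tokensFrom_nil_left]

theorem alt_eq (message : String) (k : Int) :
    crop_words_alt message k = rhs message.toList k [] [] := by
  by_cases hk : k < 0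
  · rw [crop_words_alt, if_pos hk, rhs_nonpos _ _ (by omega)]
  · have hk0 : 0 ≤ k := by omega
    have htok : (if PySem.Str.len message ≤ k then
          PySem.Chars.splitOn message.toList [' ']
        else if PySem.Str.pyGet? message k = some ' ' then
          PySem.Chars.splitOn (PySem.Str.slice message none (some k)).toList [' ']
        else
          PySem.List.slice (PySem.Chars.splitOn (PySem.Str.slice message none (some k)).toList [' ']) none (some (-1)))
        = (if ((message.toList.length : Int)) ≤ k then splitSp message.toList
           else if message.toList.getD k.toNat ' ' = ' ' then splitSp (List.take k.toNat message.toList)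
           else (splitSp (List.take k.toNat message.toList)).dropLast) := by
      rw [PySem.Str.len_eq]
      by_cases h1 : ((message.toList.length : Int) ≤ k)
      · rw [if_pos h1, if_pos h1, splitOn_space]
      · have hkl : k.toNat < message.toList.length := by omega
        have hsl : (PySem.Str.slice message none (some k)).toList = List.take k.toNat message.toList := by
          rw [PySem.Str.toList_slice, PySem.Chars.slice_eq_listSlice, PySem.List.slice_to _ hk0]
        have hpg : PySem.Str.pyGet? message k = some (message.toList.getD k.toNat ' ') := by
          rw [PySem.Str.pyGet?, PySem.Chars.pyGet?_eq_listPyGet?, PySem.List.pyGet?_of_nonneg _ hk0,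
            List.getElem?_eq_getElem hkl, List.getD_eq_getElem _ _ hkl]
        rw [if_neg h1, if_neg h1, hpg, hsl, splitOn_space, PySem.List.slice_to_neg_one]
        by_cases hsp : message.toList.getD k.toNat ' ' = ' '
        · rw [if_pos hsp, if_pos (by rw [hsp])]
        · rw [if_neg hsp, if_neg (by simpa using hsp)]
    rw [rhs_alt _ _ hk0, fin2_nil_left]
    simp only [crop_words_alt, if_neg hk, htok]

-- ===== VERDICT (by name: the statement is the Claim_ definition above) =====
theorem crop_words_spec : Claim_equal_crop_words := by
  intro message k _
  unfold Spec_crop_words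
  rw [alt_eq, crop_words, loop_eq]
  norm_num
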